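-- pv_equiv track=rewrite | github.com/ForthA/Kolokvium | resultant_m1.py | DIV_NN_N
-- ===== SOURCE A (Python) =====
-- def DIV_NN_N(A, B):
--     a = 0
--     k = 0
--     for i in range(len(A) - 1, -1, -1):
--         a += A[i] * 10 ** k
--         k += 1
--     b = 0
--     k = 0
--     for i in range(len(B) - 1, -1, -1):
--         b += B[i] * 10 ** k
--         k += 1
--     d = a // b
--     temp = [0] * len(A)
--     count = 0
--     while d != 0:
--         temp.append(d % 10)
--         d = d // 10
--         count += 1
--     temp.reverse()
--     return temp[0:count]
-- ===== SOURCE B (Python) =====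
-- def _digits(d):
--     # most-significant-first decimal digits of d (empty for 0)
--     if d == 0:
--         return []
--     return _digits(d // 10) + [d % 10]
--
--
-- def DIV_NN_N(A, B):
--     a = 0
--     for x in A:
--         a = 10 * a + x
--     b = 0
--     for x in B:
--         b = 10 * b + x
--     return _digits(a // b)
-- ===== Notes on version B (the rewrite author's own statement) =====
-- stated objective: simpler
-- what changed: Horner-style left fold replaces per-index 10**k power recomputation, and the quotient's digits are produced directly by recursion instead of padding a zero-filled list, appending, reversing and slicing.
import Mathlib
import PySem

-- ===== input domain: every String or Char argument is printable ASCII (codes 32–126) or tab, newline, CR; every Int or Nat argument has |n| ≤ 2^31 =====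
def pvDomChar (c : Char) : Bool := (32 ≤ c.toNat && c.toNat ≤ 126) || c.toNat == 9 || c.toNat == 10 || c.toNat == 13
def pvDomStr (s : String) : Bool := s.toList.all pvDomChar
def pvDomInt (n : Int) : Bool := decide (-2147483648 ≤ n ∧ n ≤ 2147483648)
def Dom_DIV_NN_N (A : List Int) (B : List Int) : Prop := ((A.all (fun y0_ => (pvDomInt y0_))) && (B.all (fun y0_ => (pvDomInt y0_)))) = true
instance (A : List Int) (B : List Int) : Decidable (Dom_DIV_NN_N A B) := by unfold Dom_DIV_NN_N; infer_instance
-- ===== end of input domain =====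

-- B replaces the per-index 10**k reconversion by a Horner fold and builds the
-- quotient's digits by direct recursion instead of pad/append/reverse/slice (objective: simpler).

-- ===== PORT A =====
-- the 'while d != 0' loop of A, with fuel d.toNat as the totality device (d strictly
-- decreases while 0 < d, so the fuel is never exhausted there; for d < 0 the Python
-- loop never terminates — those inputs are excluded by Pre_).
def pyDigitLoopF (fuel : Nat) (d : Int) (temp : List Int) (count : Int) : List Int × Int :=
  match fuel with
  | 0 => (temp, count)
  | fuel + 1 =>
    if 0 < d then
      pyDigitLoopF fuel (PySem.Int.floordiv d 10) (temp ++ [PySem.Int.mod d 10]) (count + 1)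
    else (temp, count)

def DIV_NN_N (A : List Int) (B : List Int) : List Int :=
  -- a-loop: k is a running exponent, always ≥ 0 in Python, so it is kept as a Nat
  let pa := (PySem.List.pyRange ((A.length : Int) - 1) (-1) (-1)).foldl
      (fun (st : Int × Nat) i => (st.1 + (PySem.List.pyGetD A i 0) * 10 ^ st.2, st.2 + 1)) (0, 0)
  let pb := (PySem.List.pyRange ((B.length : Int) - 1) (-1) (-1)).foldl
      (fun (st : Int × Nat) i => (st.1 + (PySem.List.pyGetD B i 0) * 10 ^ st.2, st.2 + 1)) (0, 0)
  let d := PySem.Int.floordiv pa.1 pb.1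
  let tc := pyDigitLoopF d.toNat d (List.replicate A.length 0) 0
  PySem.List.slice tc.1.reverse (some 0) (some tc.2)

-- ===== PORT B =====
-- recursion of Source B's _digits, with the same fuel device (exact for d ≥ 0; for d < 0
-- the Python recursion does not terminate — outside Pre_).
def altDigitsF (fuel : Nat) (d : Int) : List Int :=
  match fuel with
  | 0 => []
  | fuel + 1 =>
    if 0 < d then altDigitsF fuel (PySem.Int.floordiv d 10) ++ [PySem.Int.mod d 10] else []

def DIV_NN_N_alt (A : List Int) (B : List Int) : List Int :=
  let a := A.foldl (fun acc x => 10 * acc + x) 0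
  let b := B.foldl (fun acc x => 10 * acc + x) 0
  altDigitsF (PySem.Int.floordiv a b).toNat (PySem.Int.floordiv a b)

-- ===== PRECONDITION & SPEC =====
-- decimal value of a digit list (Horner), used only to state Pre_
def pvVal (xs : List Int) : Int := xs.foldl (fun acc x => 10 * acc + x) 0

-- Pre_ excludes b = 0 (Python A raises ZeroDivisionError) and negative quotients
-- (Python A's 'while d != 0' loop never terminates for d < 0).
def Pre_DIV_NN_N (A : List Int) (B : List Int) : Prop :=
  pvVal B ≠ 0 ∧ 0 ≤ PySem.Int.floordiv (pvVal A) (pvVal B)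
instance (A : List Int) (B : List Int) : Decidable (Pre_DIV_NN_N A B) := by
  unfold Pre_DIV_NN_N; infer_instance

def pvWitness_DIV_NN_N : List Int × List Int := ([1, 2], [3])

def Spec_DIV_NN_N (A : List Int) (B : List Int) (out : List Int) : Prop := out = DIV_NN_N_alt A B
instance (A : List Int) (B : List Int) (out : List Int) : Decidable (Spec_DIV_NN_N A B out) := by
  unfold Spec_DIV_NN_N; infer_instance

-- ===== CLAIM (what is proved, stated in full; the proofs are below) =====
def Claim_equal_DIV_NN_N : Prop := ∀ (A : List Int) (B : List Int), Dom_DIV_NN_N A B → Pre_DIV_NN_N A B → Spec_DIV_NN_N A B (DIV_NN_N A B)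

-- ===== LEMMAS AND PROOFS =====

-- Horner fold from an arbitrary seed
theorem horner_from (xs : List Int) (a : Int) :
    xs.foldl (fun acc x => 10 * acc + x) a
      = a * 10 ^ xs.length + xs.foldl (fun acc x => 10 * acc + x) 0 := by
  induction xs generalizing a with
  | nil => simp
  | cons y ys ih =>
    simp only [List.foldl_cons, List.length_cons]
    rw [ih (10 * a + y), ih (10 * 0 + y)]
    ring

-- fold-shift lemma for the right-to-left power sum: seed (a, k) shifts the result
theorem revfold_shift (ys : List Int) (a : Int) (k : Nat) :
    ys.foldl (fun (st : Int × Nat) y => (st.1 + y * 10 ^ st.2, st.2 + 1)) (a, k)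
      = (a + 10 ^ k * (ys.foldl (fun (st : Int × Nat) y => (st.1 + y * 10 ^ st.2, st.2 + 1)) (0, 0)).1,
         k + ys.length) := by
  induction ys generalizing a k with
  | nil => simp
  | cons y ys ih =>
    simp only [List.foldl_cons]
    rw [ih (a + y * 10 ^ k) (k + 1), ih (0 + y * 10 ^ 0) 1]
    simp only [Prod.mk.injEq, List.length_cons]
    constructor
    · ring
    · omega

-- the indices visited by A's loops fetch exactly xs.reverse
theorem map_get_countdown (xs : List Int) :
    (PySem.List.pyRange ((xs.length : Int) - 1) (-1) (-1)).map (fun i => PySem.List.pyGetD xs i 0)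
      = xs.reverse := by
  rw [PySem.List.pyRange_neg_one]
  have hlen : (((xs.length : Int) - 1) - (-1)).toNat = xs.length := by omega
  rw [List.map_map, hlen]
  apply List.ext_getElem
  · simp
  · intro k h1 h2
    have hk : k < xs.length := by simpa using h2
    simp only [List.getElem_map, List.getElem_range, Function.comp_apply, List.getElem_reverse]
    rw [PySem.List.pyGetD_eq_getElem _ _ (by omega) (by omega)]
    congr 1
    omega

-- A's right-to-left power sum over xs.reverse equals the Horner value
theorem revsum_eq_horner (xs : List Int) :
    (xs.reverse.foldl (fun (st : Int × Nat) y => (st.1 + y * 10 ^ st.2, st.2 + 1)) (0, 0)).1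
      = pvVal xs := by
  induction xs with
  | nil => simp [pvVal]
  | cons y ys ih =>
    rw [List.reverse_cons, List.foldl_append]
    rw [revfold_shift ys.reverse 0 0] at ih ⊢
    simp only [List.foldl_cons, List.foldl_nil, List.length_reverse, pow_zero, one_mul,
      zero_add] at ih ⊢
    rw [pvVal, List.foldl_cons, horner_from]
    simp only [mul_zero, zero_add]
    rw [← pvVal, ← ih]
    ring

-- the full conversion: A's indexed power-sum loop computes pvVal
theorem loopA_eq_pvVal (xs : List Int) :
    ((PySem.List.pyRange ((xs.length : Int) - 1) (-1) (-1)).foldl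
      (fun (st : Int × Nat) i => (st.1 + (PySem.List.pyGetD xs i 0) * 10 ^ st.2, st.2 + 1)) (0, 0)).1
      = pvVal xs := by
  have h := congrArg
      (fun l => (l.foldl (fun (st : Int × Nat) y => (st.1 + y * 10 ^ st.2, st.2 + 1)) ((0 : Int), (0 : Nat))).1)
      (map_get_countdown xs)
  simp only [List.foldl_map] at h
  exact h.trans (revsum_eq_horner xs)

-- A's while-loop appends B's digit list reversed, and counts its length
theorem pyDigitLoopF_spec (fuel : Nat) (d : Int) (temp : List Int) (c : Int) :
    pyDigitLoopF fuel d temp c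
      = (temp ++ (altDigitsF fuel d).reverse, c + (altDigitsF fuel d).length) := by
  induction fuel generalizing d temp c with
  | zero => simp [pyDigitLoopF, altDigitsF]
  | succ fuel ih =>
    rw [pyDigitLoopF, altDigitsF]
    by_cases h : 0 < d
    · rw [if_pos h, if_pos h, ih]
      simp only [Prod.mk.injEq, List.reverse_append, List.reverse_cons, List.reverse_nil,
        List.nil_append, List.append_assoc, List.length_append, List.length_cons,
        List.length_nil, List.cons_append]
      constructor
      · trivial
      · push_cast; omega
    · rw [if_neg h, if_neg h]
      simp

-- ===== VERDICT (by name: the statement is the Claim_ definition above) =====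
theorem DIV_NN_N_spec : Claim_equal_DIV_NN_N := by
  unfold Claim_equal_DIV_NN_N
  intro A B _ _
  unfold Spec_DIV_NN_N DIV_NN_N DIV_NN_N_alt
  simp only [loopA_eq_pvVal, pyDigitLoopF_spec, pvVal]
  rw [PySem.List.slice_zero_start]
  rw [PySem.List.slice_to _ (by omega)]
  simp only [List.reverse_append, List.reverse_reverse, List.reverse_replicate, zero_add,
    Int.toNat_natCast]
  exact List.take_left
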